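-- pv_equiv track=rewrite | github.com/adutoi/QodeApplications | Be-states/densities_old.py | all_configs
-- ===== SOURCE A (Python) =====
-- def all_configs(active, n_elec, _beg=0, _config=None):
--     if _config==None:  _config = []
--     if n_elec==0:
--         return [_config]
--     else:
--         new_configs = []
--         for p in range(_beg, len(active)):
--             new_config = _config + [active[p]]
--             new_configs += all_configs(active, n_elec-1, _beg=p+1, _config=new_config)
--         return new_configs
-- ===== SOURCE B (Python) =====
-- def all_configs(active, n_elec, _beg=0, _config=None):
--     if _config is None:
--         _config = []
--     if n_elec < 0:
--         return []
--     # breadth-first layering instead of self-recursion: each pass extends every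
--     # partial configuration by one more position chosen after its last one
--     partials = [(list(_config), _beg)]
--     for _ in range(n_elec):
--         if not partials:
--             break
--         partials = [(cfg + [active[p]], p + 1)
--                     for cfg, start in partials
--                     for p in range(start, len(active))]
--     return [cfg for cfg, _ in partials]
-- ===== Notes on version B (the rewrite author's own statement) =====
-- stated objective: alternative
-- what changed: Replaces A's self-recursion with an iterative breadth-first layering: a list of partial (configuration, next-start) pairs is extended n_elec times by one chosen element each pass, yielding the same lexicographic order.
import Mathlib
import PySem

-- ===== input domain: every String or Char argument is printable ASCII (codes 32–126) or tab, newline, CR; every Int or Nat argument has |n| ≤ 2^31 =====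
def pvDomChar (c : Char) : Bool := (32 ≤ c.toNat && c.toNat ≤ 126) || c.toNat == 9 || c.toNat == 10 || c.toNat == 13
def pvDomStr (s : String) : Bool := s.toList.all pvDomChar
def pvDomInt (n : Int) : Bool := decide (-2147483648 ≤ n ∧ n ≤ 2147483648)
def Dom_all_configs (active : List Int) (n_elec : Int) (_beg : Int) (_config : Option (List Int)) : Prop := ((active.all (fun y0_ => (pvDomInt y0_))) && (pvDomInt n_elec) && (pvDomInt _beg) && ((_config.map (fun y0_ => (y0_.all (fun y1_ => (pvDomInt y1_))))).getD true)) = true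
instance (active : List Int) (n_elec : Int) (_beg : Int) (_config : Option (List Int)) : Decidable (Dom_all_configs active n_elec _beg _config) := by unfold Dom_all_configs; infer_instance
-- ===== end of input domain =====

-- B replaces A's self-recursion with an iterative breadth-first layering over partial
-- configurations (alternative decomposition, same cost); equal on Pre_ (A raises outside it).


-- ===== PORT A =====
-- Literal transliteration of A's recursion; the `for p in range(_beg, len(active))`
-- loop is the loop helper below.  active[p] is ported as pyGetD (index can be negative:
-- Python wraps); the IndexError case (p < -len(active)) is excluded by Pre_all_configs.
mutual
def all_configs (active : List Int) (n_elec : Int) (_beg : Int) (_config : Option (List Int)) : List (List Int) :=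
  -- if _config==None: _config = []
  if n_elec = 0 then [_config.getD []]
  else allConfigsLoop active n_elec _beg (_config.getD []) []
termination_by (2 * ((active.length : Int) - _beg).toNat + 1)

-- the `for p in range(_beg, len(active))` accumulation loop of A
def allConfigsLoop (active : List Int) (n_elec : Int) (p : Int) (config : List Int) (new_configs : List (List Int)) : List (List Int) :=
  if h : p < (active.length : Int) then
    allConfigsLoop active n_elec (p + 1) config
      (new_configs ++ all_configs active (n_elec - 1) (p + 1) (some (config ++ [PySem.List.pyGetD active p 0])))
  else new_configs
termination_by (2 * ((active.length : Int) - p).toNat)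
decreasing_by all_goals omega
end

-- ===== PORT B =====
-- Transliteration of Source B: guard negative n_elec, then n_elec breadth-first passes over
-- the list of partial (configuration, next-start) pairs, finally project the configurations.
def all_configs_alt (active : List Int) (n_elec : Int) (_beg : Int) (_config : Option (List Int)) : List (List Int) :=
  let config := _config.getD []
  if n_elec < 0 then []
  else
    let partials := (List.range n_elec.toNat).foldl
      (fun ps _ => if ps = [] then ps else ps.flatMap (fun cs =>
        (PySem.List.pyRange cs.2 (active.length : Int) 1).map
          (fun p => (cs.1 ++ [PySem.List.pyGetD active p 0], p + 1))))
      [(config, _beg)]  -- `if not partials: break` ported as the absorbing [] guard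
    partials.map Prod.fst

-- ===== PRECONDITION & SPEC =====
-- Pre_ excludes exactly the inputs on which Python A raises IndexError:
-- n_elec ≠ 0 makes A evaluate active[_beg], which fails when _beg < -len(active).
def Pre_all_configs (active : List Int) (n_elec : Int) (_beg : Int) (_config : Option (List Int)) : Prop :=
  n_elec = 0 ∨ -(active.length : Int) ≤ _beg
instance (active : List Int) (n_elec : Int) (_beg : Int) (_config : Option (List Int)) : Decidable (Pre_all_configs active n_elec _beg _config) := by unfold Pre_all_configs; infer_instance
def pvWitness_all_configs : List Int × Int × Int × Option (List Int) := ([4, 7, 9], 2, 0, none)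

def Spec_all_configs (active : List Int) (n_elec : Int) (_beg : Int) (_config : Option (List Int)) (out : List (List Int)) : Prop := out = all_configs_alt active n_elec _beg _config
instance (active : List Int) (n_elec : Int) (_beg : Int) (_config : Option (List Int)) (out : List (List Int)) : Decidable (Spec_all_configs active n_elec _beg _config out) := by unfold Spec_all_configs; infer_instance

-- ===== CLAIM (what is proved, stated in full; the proofs are below) =====
def Claim_equal_all_configs : Prop := ∀ (active : List Int) (n_elec : Int) (_beg : Int) (_config : Option (List Int)), Dom_all_configs active n_elec _beg _config → Pre_all_configs active n_elec _beg _config → Spec_all_configs active n_elec _beg _config (all_configs active n_elec _beg _config)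

-- ===== LEMMAS AND PROOFS =====

-- mathematical spec: the lexicographically ordered position-combinations, read off active
def pvCombos (active : List Int) : Nat → Int → List (List Int)
  | 0, _ => [[]]
  | n+1, b => (PySem.List.pyRange b (active.length : Int) 1).flatMap
      (fun p => (pvCombos active n (p+1)).map (fun t => PySem.List.pyGetD active p 0 :: t))

-- A's loop accumulates the flatMap of A's recursive calls over the index range
theorem loop_spec (active : List Int) (n : Int) (config : List Int) (p : Int) (acc : List (List Int)) :
    allConfigsLoop active n p config acc =
      acc ++ (PySem.List.pyRange p (active.length : Int) 1).flatMap
        (fun q => all_configs active (n-1) (q+1) (some (config ++ [PySem.List.pyGetD active q 0]))) := by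
  by_cases h : p < (active.length : Int)
  · rw [allConfigsLoop, dif_pos h, loop_spec active n config (p+1), PySem.List.pyRange_one_cons h]
    simp [List.append_assoc]
  · rw [allConfigsLoop, dif_neg h, PySem.List.pyRange_one_eq_nil (by omega)]
    simp
termination_by ((active.length : Int) - p).toNat
decreasing_by omega

-- A returns [] for negative n_elec (the recursion bottoms out at the end of the range)
theorem A_neg (active : List Int) (n _beg : Int) (config : Option (List Int)) (h : n < 0) :
    all_configs active n _beg config = [] := by
  rw [all_configs, if_neg (by omega : ¬ n = 0), loop_spec, List.nil_append,
      List.flatMap_eq_nil_iff.mpr]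
  intro q hq
  have hq' := (PySem.List.mem_pyRange_one).mp hq
  exact A_neg active (n-1) (q+1) _ (by omega)
termination_by ((active.length : Int) - _beg).toNat
decreasing_by omega

-- A computes the combinations, each prefixed by the inherited configuration
theorem A_spec_aux (active : List Int) (m : Nat) (n b : Int) (config : Option (List Int))
    (hn : n = (m : Int)) :
    all_configs active n b config = (pvCombos active m b).map ((config.getD []) ++ ·) := by
  induction m generalizing n b config with
  | zero => subst hn; simp [all_configs, pvCombos]
  | succ k ih =>
    rw [all_configs, if_neg (by omega : ¬ n = 0), loop_spec, List.nil_append]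
    simp only [pvCombos, List.map_flatMap]
    refine List.flatMap_congr ?_
    intro q _
    rw [ih (n-1) (q+1) _ (by omega)]
    simp [Function.comp, List.map_map, List.append_assoc]

-- B computes the same combinations: one breadth-first pass per chosen element
theorem B_step_pow (active : List Int) (m : Nat) (ps : List (List Int × Int)) :
    ((fun (ps : List (List Int × Int)) => ps.flatMap (fun cs =>
        (PySem.List.pyRange cs.2 (active.length : Int) 1).map
          (fun p => (cs.1 ++ [PySem.List.pyGetD active p 0], p + 1))))^[m] ps).map Prod.fst =
      ps.flatMap (fun cs => (pvCombos active m cs.2).map (cs.1 ++ ·)) := by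
  induction m generalizing ps with
  | zero =>
    simp only [Function.iterate_zero, id, pvCombos]
    induction ps with
    | nil => simp
    | cons c t iht => simp_all
  | succ k ih =>
    rw [Function.iterate_succ_apply, ih]
    simp only [List.flatMap_assoc, pvCombos, List.map_flatMap, List.flatMap_map]
    refine List.flatMap_congr ?_
    intro cs _
    refine List.flatMap_congr ?_
    intro q _
    simp [Function.comp, List.map_map, List.append_assoc]

theorem foldl_range_const {α : Type} (f : α → α) (init : α) (n : Nat) :
    (List.range n).foldl (fun x _ => f x) init = f^[n] init := by
  induction n with
  | zero => simp
  | succ k ih => rw [List.range_succ, List.foldl_append, ih, Function.iterate_succ_apply']; simp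

theorem B_spec (active : List Int) (n b : Int) (config : Option (List Int)) (h : 0 ≤ n) :
    all_configs_alt active n b config = (pvCombos active n.toNat b).map ((config.getD []) ++ ·) := by
  rw [all_configs_alt]
  simp only [if_neg (by omega : ¬ n < 0)]
  have hstep : (fun (ps : List (List Int × Int)) (_ : Nat) => if ps = [] then ps else ps.flatMap (fun cs =>
        (PySem.List.pyRange cs.2 (active.length : Int) 1).map
          (fun p => (cs.1 ++ [PySem.List.pyGetD active p 0], p + 1)))) =
      (fun ps _ => ps.flatMap (fun cs =>
        (PySem.List.pyRange cs.2 (active.length : Int) 1).map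
          (fun p => (cs.1 ++ [PySem.List.pyGetD active p 0], p + 1)))) := by
    funext ps k; split <;> simp_all
  rw [hstep, foldl_range_const, B_step_pow]
  simp

-- ===== VERDICT (by name: the statement is the Claim_ definition above) =====
theorem all_configs_spec : Claim_equal_all_configs := by
  intro active n_elec _beg _config _ _
  unfold Spec_all_configs
  by_cases h : n_elec < 0
  · rw [A_neg active n_elec _beg _config h, all_configs_alt]
    simp [h]
  · rw [A_spec_aux active n_elec.toNat n_elec _beg _config (by omega),
        B_spec active n_elec _beg _config (by omega)]
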